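-- pv_equiv track=rewrite | github.com/Learning-and-Intelligent-Systems/stacking | learning/evaluate/utils.py | potential_actions
-- ===== SOURCE A (Python) =====
-- def potential_actions(num_blocks):
--     pos_actions = []
--     neg_actions = []
--     for bb in range(1, num_blocks+1):
--         for bt in range(1, num_blocks+1):
--             if bt == bb+1:
--                 pos_actions.append(str(bb)+','+str(bt))
--             elif bt != bb:
--                 neg_actions.append(str(bb)+','+str(bt))
--     return pos_actions, neg_actions
-- ===== SOURCE B (Python) =====
-- def potential_actions(num_blocks):
--     pos_actions = [f"{bb},{bb+1}" for bb in range(1, num_blocks)]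
--     neg_actions = [f"{bb},{bt}"
--                    for bb in range(1, num_blocks + 1)
--                    for bt in list(range(1, bb)) + list(range(bb + 2, num_blocks + 1))]
--     return pos_actions, neg_actions
-- ===== Notes on version B (the rewrite author's own statement) =====
-- stated objective: simpler
-- what changed: Replaces the branching nested scan by a closed-form comprehension for the adjacent pos pairs and, for neg, a per-row concatenation of the two index ranges 1..bb-1 and bb+2..num_blocks with no conditional at all.
import Mathlib
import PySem

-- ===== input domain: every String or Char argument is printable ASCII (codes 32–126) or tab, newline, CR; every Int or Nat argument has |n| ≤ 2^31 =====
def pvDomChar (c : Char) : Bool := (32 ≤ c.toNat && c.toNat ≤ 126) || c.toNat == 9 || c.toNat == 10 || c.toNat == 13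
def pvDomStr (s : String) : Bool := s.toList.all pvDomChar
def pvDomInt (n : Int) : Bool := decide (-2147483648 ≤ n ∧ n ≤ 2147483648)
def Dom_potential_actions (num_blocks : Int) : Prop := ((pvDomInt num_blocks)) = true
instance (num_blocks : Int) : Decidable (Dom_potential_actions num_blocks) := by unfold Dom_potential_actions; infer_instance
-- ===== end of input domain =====

-- B builds pos in closed form and neg by concatenating two conditional-free ranges per row; same values, same O(n^2) cost.

-- ===== PORT A =====
def potential_actions (num_blocks : Int) : List String × List String :=
  (PySem.List.pyRange 1 (num_blocks + 1) 1).foldl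
    (fun acc bb =>
      (PySem.List.pyRange 1 (num_blocks + 1) 1).foldl
        (fun acc2 bt =>
          if bt == bb + 1 then
            (acc2.1 ++ [PySem.Int.toStr bb ++ "," ++ PySem.Int.toStr bt], acc2.2)
          else if bt != bb then
            (acc2.1, acc2.2 ++ [PySem.Int.toStr bb ++ "," ++ PySem.Int.toStr bt])
          else acc2)
        acc)
    ([], [])

-- ===== PORT B =====
def potential_actions_alt (num_blocks : Int) : List String × List String :=
  ((PySem.List.pyRange 1 num_blocks 1).map
      (fun bb => PySem.Int.toStr bb ++ "," ++ PySem.Int.toStr (bb + 1)),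
   (PySem.List.pyRange 1 (num_blocks + 1) 1).flatMap
      (fun bb =>
        (PySem.List.pyRange 1 bb 1 ++ PySem.List.pyRange (bb + 2) (num_blocks + 1) 1).map
          (fun bt => PySem.Int.toStr bb ++ "," ++ PySem.Int.toStr bt)))

-- ===== PRECONDITION & SPEC =====
def Spec_potential_actions (num_blocks : Int) (out : List String × List String) : Prop := out = potential_actions_alt num_blocks
instance (num_blocks : Int) (out : List String × List String) : Decidable (Spec_potential_actions num_blocks out) := by unfold Spec_potential_actions; infer_instance

-- ===== CLAIM (what is proved, stated in full; the proofs are below) =====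
def Claim_equal_potential_actions : Prop := ∀ (num_blocks : Int), Dom_potential_actions num_blocks → Spec_potential_actions num_blocks (potential_actions num_blocks)

-- ===== LEMMAS AND PROOFS =====

-- the per-pair string
def pvS (bb bt : Int) : String := PySem.Int.toStr bb ++ "," ++ PySem.Int.toStr bt

-- A's inner loop over any list of bt's, characterised by filters.
theorem inner_loop_eq (bb : Int) (L : List Int) (p q : List String) :
    L.foldl
      (fun (acc2 : List String × List String) bt =>
        if bt == bb + 1 then (acc2.1 ++ [pvS bb bt], acc2.2)
        else if bt != bb then (acc2.1, acc2.2 ++ [pvS bb bt])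
        else acc2)
      (p, q)
    = (p ++ (L.filter (fun bt => bt == bb + 1)).map (pvS bb),
       q ++ (L.filter (fun bt => !(bt == bb + 1) && bt != bb)).map (pvS bb)) := by
  induction L generalizing p q with
  | nil => simp
  | cons x xs ih =>
    rw [List.foldl_cons]
    by_cases hx : x = bb + 1
    · rw [if_pos (by simp [hx]), ih]
      simp [hx]
    · by_cases hx2 : x = bb
      · rw [if_neg (by simp [hx]), if_neg (by simp [hx2]), ih]
        simp [hx2]
      · rw [if_neg (by simp [hx]), if_pos (by simp [bne, hx2]), ih]
        simp [hx, hx2]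

-- A's outer loop over a list of rows given componentwise.
theorem outer_loop_eq (f g : Int → List String) (L : List Int) (p q : List String) :
    L.foldl (fun (acc : List String × List String) bb => (acc.1 ++ f bb, acc.2 ++ g bb)) (p, q)
    = (p ++ L.flatMap f, q ++ L.flatMap g) := by
  induction L generalizing p q with
  | nil => simp
  | cons x xs ih => simp [ih]

-- pos row: for 1 ≤ bb < n+1 the only bt with bt = bb+1 in range(1, n+1)
theorem pos_row (n bb : Int) (h1 : 1 ≤ bb) (h2 : bb < n + 1) :
    (PySem.List.pyRange 1 (n + 1) 1).filter (fun bt => bt == bb + 1)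
    = if bb + 1 < n + 1 then [bb + 1] else [] := by
  split
  · next h =>
    rw [PySem.List.pyRange_one_append 1 (bb + 1) (n + 1) (by omega) (by omega),
        PySem.List.pyRange_one_cons h, List.filter_append, List.filter_cons,
        List.filter_eq_nil_iff.mpr (fun x hx => by
          have := PySem.List.mem_pyRange_one.mp hx; simp only [beq_iff_eq]; omega),
        List.filter_eq_nil_iff.mpr (fun x hx => by
          have := PySem.List.mem_pyRange_one.mp hx; simp only [beq_iff_eq]; omega)]
    simp
  · next h =>
    rw [List.filter_eq_nil_iff]
    intro x hx
    have := PySem.List.mem_pyRange_one.mp hx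
    simp only [beq_iff_eq]
    omega

-- neg row: filtering out bb and bb+1 from range(1, n+1) leaves the two ranges B concatenates
theorem neg_row (n bb : Int) (h1 : 1 ≤ bb) (h2 : bb < n + 1) :
    (PySem.List.pyRange 1 (n + 1) 1).filter (fun bt => !(bt == bb + 1) && bt != bb)
    = PySem.List.pyRange 1 bb 1 ++ PySem.List.pyRange (bb + 2) (n + 1) 1 := by
  have hleft : (PySem.List.pyRange 1 bb 1).filter (fun bt => !(bt == bb + 1) && bt != bb)
      = PySem.List.pyRange 1 bb 1 := by
    rw [List.filter_eq_self]
    intro x hx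
    have := PySem.List.mem_pyRange_one.mp hx
    simp only [bne, Bool.and_eq_true, Bool.not_eq_true', beq_eq_false_iff_ne]
    omega
  by_cases hc : bb + 1 < n + 1
  · rw [PySem.List.pyRange_one_append 1 bb (n + 1) (by omega) (by omega),
        PySem.List.pyRange_one_cons (show bb < n + 1 by omega),
        PySem.List.pyRange_one_cons hc]
    rw [List.filter_append, hleft, List.filter_cons, List.filter_cons]
    have hrt : (PySem.List.pyRange (bb + 1 + 1) (n + 1) 1).filter
        (fun bt => !(bt == bb + 1) && bt != bb) = PySem.List.pyRange (bb + 2) (n + 1) 1 := by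
      have hadd : bb + 1 + 1 = bb + 2 := by ring
      rw [hadd, List.filter_eq_self]
      intro x hx
      have := PySem.List.mem_pyRange_one.mp hx
      simp only [bne, Bool.and_eq_true, Bool.not_eq_true', beq_eq_false_iff_ne]
      omega
    simp [hrt]
  · -- bb = n : range(bb+2, n+1) is empty and only bb itself is dropped
    rw [PySem.List.pyRange_one_append 1 bb (n + 1) (by omega) (by omega),
        PySem.List.pyRange_one_cons (show bb < n + 1 by omega),
        PySem.List.pyRange_one_eq_nil (show n + 1 ≤ bb + 1 by omega),
        PySem.List.pyRange_one_eq_nil (show n + 1 ≤ bb + 2 by omega)]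
    rw [List.filter_append, hleft, List.filter_cons]
    simp

theorem pos_flatMap (n : Int) :
    (PySem.List.pyRange 1 (n + 1) 1).flatMap
      (fun bb => if bb + 1 < n + 1 then [pvS bb (bb + 1)] else [])
    = (PySem.List.pyRange 1 n 1).map (fun bb => pvS bb (bb + 1)) := by
  by_cases hn : 1 ≤ n
  · rw [PySem.List.pyRange_one_append 1 n (n + 1) hn (by omega),
        PySem.List.pyRange_one_cons (show n < n + 1 by omega),
        PySem.List.pyRange_one_eq_nil (show n + 1 ≤ n + 1 by omega),
        List.flatMap_append,
        List.flatMap_congr (l := PySem.List.pyRange 1 n 1)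
          (g := fun bb => [pvS bb (bb + 1)])
          (fun x hx => by
            have := PySem.List.mem_pyRange_one.mp hx
            rw [if_pos (by omega)])]
    simp [List.map_eq_flatMap.symm]
  · rw [PySem.List.pyRange_one_eq_nil (show n + 1 ≤ 1 by omega),
        PySem.List.pyRange_one_eq_nil (show n ≤ 1 by omega)]
    simp

-- ===== VERDICT (by name: the statement is the Claim_ definition above) =====
theorem potential_actions_spec : Claim_equal_potential_actions := by
  intro n _
  show potential_actions n = potential_actions_alt n
  unfold potential_actions potential_actions_alt
  refine ((PySem.List.foldl_congr_mem _ _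
        (fun (acc : List String × List String) bb =>
          (acc.1 ++ (((PySem.List.pyRange 1 (n + 1) 1).filter (fun bt => bt == bb + 1)).map (pvS bb)),
           acc.2 ++ (((PySem.List.pyRange 1 (n + 1) 1).filter
              (fun bt => !(bt == bb + 1) && bt != bb)).map (pvS bb))))
        _ (fun acc bb _ => inner_loop_eq bb _ acc.1 acc.2)).trans
      ((outer_loop_eq _ _ _ [] []).trans ?_))
  simp only [List.nil_append]
  refine Prod.ext ?_ ?_
  · show (PySem.List.pyRange 1 (n + 1) 1).flatMap
        (fun bb => ((PySem.List.pyRange 1 (n + 1) 1).filter (fun bt => bt == bb + 1)).map (pvS bb)) = _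
    have hc : ∀ bb ∈ PySem.List.pyRange 1 (n + 1) 1,
        ((PySem.List.pyRange 1 (n + 1) 1).filter (fun bt => bt == bb + 1)).map (pvS bb)
        = (if bb + 1 < n + 1 then [pvS bb (bb + 1)] else []) := by
      intro bb hbb
      have := PySem.List.mem_pyRange_one.mp hbb
      rw [pos_row n bb (by omega) (by omega)]
      split <;> rfl
    rw [List.flatMap_congr hc, pos_flatMap n]
    rfl
  · show (PySem.List.pyRange 1 (n + 1) 1).flatMap
        (fun bb => ((PySem.List.pyRange 1 (n + 1) 1).filter
          (fun bt => !(bt == bb + 1) && bt != bb)).map (pvS bb)) = _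
    exact List.flatMap_congr (fun bb hbb => by
      have := PySem.List.mem_pyRange_one.mp hbb
      rw [neg_row n bb (by omega) (by omega)]
      rfl)
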